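-- pv_equiv track=rewrite | github.com/ammonelzinga/DataQueryInterpreter | Relation.py | __findCommonAttribute
-- ===== SOURCE A (Python) =====
-- def __findCommonAttribute(header_1,header_2):
--     # The following code is written for clarity and not for speed
--     #number_common_attributes = 0
--     common_attribute_index_dict = {}
--     for attribute_1_index in range(len(header_1)):
--         for attribute_2_index in range(len(header_2)):
--             if header_1[attribute_1_index] == header_2[attribute_2_index]:
--                 common_attribute_index = [attribute_1_index, attribute_2_index]
--                 #number_common_attributes += 1
--                 common_attribute_index_dict[header_1[attribute_1_index]]=(common_attribute_index)
--     #if number_common_attributes != 1: raise ValueError # Special case has exactly one matching attribute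
--     return common_attribute_index_dict
-- ===== SOURCE B (Python) =====
-- def __findCommonAttribute(header_1, header_2):
--     # One pass over each header: record the last index of every name,
--     # then emit, in order of first occurrence in header_1, the common names.
--     last_2 = {name: j for j, name in enumerate(header_2)}
--     last_1 = {name: i for i, name in enumerate(header_1)}
--     return {name: [last_1[name], last_2[name]]
--             for name in header_1 if name in last_2}
-- ===== Notes on version B (the rewrite author's own statement) =====
-- stated objective: faster
-- what changed: A's nested scan over all index pairs is replaced by two single-pass last-index dictionaries (one per header) and one filtered pass over header_1 that emits [last_1[name], last_2[name]] for every common name.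
import Mathlib
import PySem

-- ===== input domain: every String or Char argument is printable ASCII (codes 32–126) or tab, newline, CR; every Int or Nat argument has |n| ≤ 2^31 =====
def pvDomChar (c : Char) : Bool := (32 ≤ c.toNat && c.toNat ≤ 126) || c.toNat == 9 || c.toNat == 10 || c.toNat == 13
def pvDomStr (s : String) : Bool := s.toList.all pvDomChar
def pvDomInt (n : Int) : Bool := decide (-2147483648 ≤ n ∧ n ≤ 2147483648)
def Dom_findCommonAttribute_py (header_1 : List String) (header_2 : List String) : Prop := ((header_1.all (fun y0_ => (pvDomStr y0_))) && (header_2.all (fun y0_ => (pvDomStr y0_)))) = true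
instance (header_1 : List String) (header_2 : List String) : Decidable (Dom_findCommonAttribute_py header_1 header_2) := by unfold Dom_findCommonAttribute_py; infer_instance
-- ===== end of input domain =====

-- B replaces A's nested index scan by two single-pass last-index dictionaries and one
-- filtered pass over header_1 (objective: faster, O(n*m) → O(n+m)); return value only.

-- ===== PORT A =====
def findCommonAttribute_py (header_1 : List String) (header_2 : List String) : List (String × List Int) :=
  let common_attribute_index_dict : PySem.Dict String (List Int) :=
    (PySem.List.pyRange 0 (header_1.length : Int) 1).foldl (fun d attribute_1_index =>
      (PySem.List.pyRange 0 (header_2.length : Int) 1).foldl (fun d attribute_2_index =>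
        if PySem.List.pyGetD header_1 attribute_1_index "" = PySem.List.pyGetD header_2 attribute_2_index "" then
          d.insert (PySem.List.pyGetD header_1 attribute_1_index "") [attribute_1_index, attribute_2_index]
        else d) d) PySem.Dict.empty
  common_attribute_index_dict.items

-- ===== PORT B =====
def findCommonAttribute_py_alt (header_1 : List String) (header_2 : List String) : List (String × List Int) :=
  let last_2 : PySem.Dict String Int :=
    (PySem.List.enumerate header_2 0).foldl (fun d p => d.insert p.2 p.1) PySem.Dict.empty
  let last_1 : PySem.Dict String Int :=
    (PySem.List.enumerate header_1 0).foldl (fun d p => d.insert p.2 p.1) PySem.Dict.empty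
  (header_1.foldl (fun d name =>
      if last_2.contains name then d.insert name [last_1.getD name 0, last_2.getD name 0] else d)
    PySem.Dict.empty).items

-- ===== PRECONDITION & SPEC =====
def Spec_findCommonAttribute_py (header_1 : List String) (header_2 : List String) (out : List (String × List Int)) : Prop := out = findCommonAttribute_py_alt header_1 header_2
instance (header_1 : List String) (header_2 : List String) (out : List (String × List Int)) : Decidable (Spec_findCommonAttribute_py header_1 header_2 out) := by unfold Spec_findCommonAttribute_py; infer_instance

-- ===== CLAIM (what is proved, stated in full; the proofs are below) =====
def Claim_equal_findCommonAttribute_py : Prop := ∀ (header_1 : List String) (header_2 : List String), Dom_findCommonAttribute_py header_1 header_2 → Spec_findCommonAttribute_py header_1 header_2 (findCommonAttribute_py header_1 header_2)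

-- ===== LEMMAS AND PROOFS =====

-- last-index dictionary of a header (proof-side name for the dicts B builds)
def lastD (xs : List String) : PySem.Dict String Int :=
  (PySem.List.enumerate xs 0).foldl (fun d p => d.insert p.2 p.1) PySem.Dict.empty

-- A's outer loop after the inner loop is collapsed (still A's index-loop shape)
def fA (L2 : PySem.Dict String Int) (h1 : List String) : PySem.Dict String (List Int) :=
  (PySem.List.pyRange 0 (h1.length : Int) 1).foldl (fun d i =>
    match L2.get? (PySem.List.pyGetD h1 i "") with
    | some j => d.insert (PySem.List.pyGetD h1 i "") [i, j]
    | none => d) PySem.Dict.empty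

-- B's loop with the lookups written as get? (lat = the last-index dict of h1)
def fB (L2 lat : PySem.Dict String Int) (h1 : List String) (d : PySem.Dict String (List Int)) : PySem.Dict String (List Int) :=
  h1.foldl (fun d s =>
    match L2.get? s with
    | some j => d.insert s [lat.getD s 0, j]
    | none => d) d

-- plain insert fold and its entry list
def bfold (ps : List (String × List Int)) (d : PySem.Dict String (List Int)) : PySem.Dict String (List Int) :=
  ps.foldl (fun d p => d.insert p.1 p.2) d

def psOf (L2 lat : PySem.Dict String Int) (h1 : List String) : List (String × List Int) :=
  h1.filterMap (fun s =>
    match L2.get? s with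
    | some j => some (s, [lat.getD s 0, j])
    | none => none)

theorem enumerate_append_singleton {α : Type} (xs : List α) (y : α) (s : Int) :
    PySem.List.enumerate (xs ++ [y]) s = PySem.List.enumerate xs s ++ [(s + xs.length, y)] := by
  induction xs generalizing s with
  | nil => simp [PySem.List.enumerate_nil, PySem.List.enumerate_cons]
  | cons a t ih =>
    simp only [List.cons_append, PySem.List.enumerate_cons, ih, List.length_cons]
    push_cast
    ring_nf

theorem lastD_append (xs : List String) (y : String) :
    lastD (xs ++ [y]) = (lastD xs).insert y (xs.length : Int) := by
  unfold lastD
  rw [enumerate_append_singleton, List.foldl_append]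
  simp

theorem inner_closed (s : String) (i : Int) (h2 : List String) (d : PySem.Dict String (List Int)) :
    (PySem.List.pyRange 0 (h2.length : Int) 1).foldl (fun d j =>
        if s = PySem.List.pyGetD h2 j "" then d.insert s [i, j] else d) d
    = match (lastD h2).get? s with
      | some j => d.insert s [i, j]
      | none => d := by
  induction h2 using List.reverseRecOn with
  | nil =>
    simp [PySem.List.pyRange_one_eq_nil (le_refl 0), lastD, PySem.List.enumerate_nil,
      PySem.Dict.get?_empty]
  | append_singleton xs y ih =>
    have hlen : (((xs ++ [y]).length : Int)) = (xs.length : Int) + 1 := by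
      simp
    rw [hlen, PySem.List.pyRange_one_succ_right (Int.natCast_nonneg _), List.foldl_append]
    rw [PySem.List.foldl_congr_mem _ _
      (fun d j => if s = PySem.List.pyGetD xs j "" then d.insert s [i, j] else d) d
      (by
        intro acc j hj
        rcases (PySem.List.mem_pyRange_one).1 hj with ⟨hj0, hj1⟩
        have e : PySem.List.pyGetD (xs ++ [y]) j "" = PySem.List.pyGetD xs j "" := by
          rw [PySem.List.pyGetD_eq_getElem (xs ++ [y]) "" hj0 (by simp; omega),
            PySem.List.pyGetD_eq_getElem xs "" hj0 (by exact_mod_cast hj1)]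
          exact List.getElem_append_left (by omega)
        simp only [e])]
    rw [ih]
    have hx : PySem.List.pyGetD (xs ++ [y]) ((xs.length : Int)) "" = y := by
      rw [PySem.List.pyGetD_eq_getElem (xs ++ [y]) "" (Int.natCast_nonneg _) (by simp)]
      simp
    rw [lastD_append, PySem.Dict.get?_insert]
    simp only [List.foldl_cons, List.foldl_nil, hx]
    by_cases hsy : s = y
    · subst hsy
      cases h : (lastD xs).get? s <;>
        simp [PySem.Dict.insert_insert_self]
    · simp only [if_neg hsy]

theorem dictA_eq_fA (h1 h2 : List String) :
    (PySem.List.pyRange 0 (h1.length : Int) 1).foldl (fun d attribute_1_index =>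
      (PySem.List.pyRange 0 (h2.length : Int) 1).foldl (fun d attribute_2_index =>
        if PySem.List.pyGetD h1 attribute_1_index "" = PySem.List.pyGetD h2 attribute_2_index "" then
          d.insert (PySem.List.pyGetD h1 attribute_1_index "") [attribute_1_index, attribute_2_index]
        else d) d) PySem.Dict.empty
    = fA (lastD h2) h1 := by
  unfold fA
  apply congrArg (fun f => List.foldl f PySem.Dict.empty (PySem.List.pyRange 0 (h1.length : Int) 1))
  funext d i
  exact inner_closed (PySem.List.pyGetD h1 i "") i h2 d

theorem dictB_eq_fB (h1 h2 : List String) :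
    (h1.foldl (fun d name =>
      if (lastD h2).contains name then d.insert name [(lastD h1).getD name 0, (lastD h2).getD name 0] else d)
      PySem.Dict.empty)
    = fB (lastD h2) (lastD h1) h1 PySem.Dict.empty := by
  unfold fB
  apply congrArg (fun f => List.foldl f PySem.Dict.empty h1)
  funext d name
  rw [PySem.Dict.contains_eq_isSome_get?, PySem.Dict.getD_eq_get?_getD (lastD h2)]
  cases h : (lastD h2).get? name <;> simp

theorem fB_eq_bfold (L2 lat : PySem.Dict String Int) (h1 : List String) (d : PySem.Dict String (List Int)) :
    fB L2 lat h1 d = bfold (psOf L2 lat h1) d := by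
  induction h1 generalizing d with
  | nil => rfl
  | cons s t ih =>
    simp only [fB, List.foldl_cons, psOf, List.filterMap_cons] at *
    cases h : L2.get? s
    · exact ih d
    · rename_i j
      have := ih (d.insert s [lat.getD s 0, j])
      simpa [bfold] using this

theorem map_fst_psOf (L2 lat : PySem.Dict String Int) (h1 : List String) :
    (psOf L2 lat h1).map Prod.fst = h1.filter (fun s => (L2.get? s).isSome) := by
  induction h1 with
  | nil => rfl
  | cons s t ih =>
    cases h : L2.get? s <;>
      simp [psOf, h] <;>
      simp [psOf] at ih <;> exact ih

theorem get?_bfold (ps : List (String × List Int)) (d : PySem.Dict String (List Int)) (k : String) :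
    (bfold ps d).get? k = (((ps.filter (fun p => p.1 == k)).map Prod.snd).getLast?).or (d.get? k) := by
  induction ps using List.reverseRecOn generalizing d with
  | nil => simp [bfold]
  | append_singleton ps p ih =>
    have hb : bfold (ps ++ [p]) d = (bfold ps d).insert p.1 p.2 := by
      simp [bfold, List.foldl_append]
    rw [hb, PySem.Dict.get?_insert, List.filter_append, List.filter_cons]
    by_cases hp : p.1 = k
    · simp [hp]
    · have hb2 : (p.1 == k) = false := by simp [hp]
      simp [hb2, ih, Ne.symm hp]

theorem filter_psOf_insert (L2 lat : PySem.Dict String Int) (h1 : List String) (x : String) (n : Int)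
    (k : String) (hk : k ≠ x) :
    (psOf L2 (lat.insert x n) h1).filter (fun p => p.1 == k)
    = (psOf L2 lat h1).filter (fun p => p.1 == k) := by
  induction h1 with
  | nil => rfl
  | cons s t ih =>
    have hcons : ∀ (lat' : PySem.Dict String Int), psOf L2 lat' (s :: t)
        = (match L2.get? s with
           | some j => [(s, [lat'.getD s 0, j])]
           | none => []) ++ psOf L2 lat' t := by
      intro lat'
      cases h : L2.get? s <;> simp [psOf, h]
    rw [hcons, hcons, List.filter_append, List.filter_append, ih]
    cases h : L2.get? s
    · rfl
    · rename_i j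
      by_cases hsk : s = k
      · subst hsk
        rw [PySem.Dict.getD_insert_of_ne lat n 0 hk]
      · have hb : (s == k) = false := by simp [hsk]
        simp [hb]

theorem eqd (d1 d2 : PySem.Dict String (List Int)) (hk : d1.keys = d2.keys) (hn : d1.keys.Nodup)
    (hg : ∀ k, d1.get? k = d2.get? k) : d1 = d2 := by
  apply PySem.Dict.ext
  rw [PySem.Dict.items_eq_map_keys d1 hn [], PySem.Dict.items_eq_map_keys d2 (hk ▸ hn) [], hk]
  refine List.map_congr_left (fun k _ => ?_)
  rw [PySem.Dict.getD_eq_get?_getD, PySem.Dict.getD_eq_get?_getD, hg k]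

theorem fB_congr (L2 lat lat' : PySem.Dict String Int) (h1 : List String) (d : PySem.Dict String (List Int))
    (h : ∀ s ∈ h1, (L2.get? s).isSome → lat.getD s 0 = lat'.getD s 0) :
    fB L2 lat h1 d = fB L2 lat' h1 d := by
  induction h1 generalizing d with
  | nil => rfl
  | cons s t ih =>
    simp only [fB, List.foldl_cons] at *
    cases hL : L2.get? s
    · exact ih _ (fun a ha hsa => h a (List.mem_cons_of_mem _ ha) hsa)
    · rw [h s (List.mem_cons_self) (by simp [hL])]
      exact ih _ (fun a ha hsa => h a (List.mem_cons_of_mem _ ha) hsa)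

theorem keys_bfold (ps : List (String × List Int)) (d : PySem.Dict String (List Int)) :
    (bfold ps d).keys = PySem.Set.update d.keys (ps.map Prod.fst) :=
  PySem.Dict.keys_foldl_insert_key ps Prod.fst (fun _ p => p.2) d

theorem nodup_keys_bfold (ps : List (String × List Int)) (d : PySem.Dict String (List Int))
    (h : d.keys.Nodup) : (bfold ps d).keys.Nodup :=
  PySem.Dict.nodup_keys_foldl_insert_key ps Prod.fst (fun _ p => p.2) d h

theorem keys_fB (L2 lat : PySem.Dict String Int) (h1 : List String) :
    (fB L2 lat h1 PySem.Dict.empty).keys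
      = PySem.Set.update ([] : List String) ((psOf L2 lat h1).map Prod.fst) := by
  rw [fB_eq_bfold, keys_bfold, PySem.Dict.keys_empty]

theorem nodup_keys_fB (L2 lat : PySem.Dict String Int) (h1 : List String) :
    (fB L2 lat h1 PySem.Dict.empty).keys.Nodup := by
  rw [fB_eq_bfold]
  exact nodup_keys_bfold _ _ PySem.Dict.nodup_keys_empty

theorem insert_congr_off (d1 d2 : PySem.Dict String (List Int)) (x : String) (v : List Int)
    (hk : d1.keys = d2.keys) (hn : d1.keys.Nodup)
    (hg : ∀ k, k ≠ x → d1.get? k = d2.get? k) : d1.insert x v = d2.insert x v := by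
  apply eqd
  · by_cases hc : d1.contains x = true
    · rw [PySem.Dict.keys_insert_of_contains d1 v hc,
        PySem.Dict.keys_insert_of_contains d2 v
          (by rw [PySem.Dict.contains_eq_decide_mem_keys, ← hk,
            ← PySem.Dict.contains_eq_decide_mem_keys]; exact hc), hk]
    · rw [PySem.Dict.keys_insert_of_not_contains d1 v (by simpa using hc),
        PySem.Dict.keys_insert_of_not_contains d2 v
          (by rw [PySem.Dict.contains_eq_decide_mem_keys, ← hk,
            ← PySem.Dict.contains_eq_decide_mem_keys]; simpa using hc), hk]
  · exact PySem.Dict.nodup_keys_insert d1 x v hn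
  · intro k
    rw [PySem.Dict.get?_insert, PySem.Dict.get?_insert]
    by_cases hkx : k = x
    · simp [hkx]
    · simp only [if_neg hkx]
      exact hg k hkx

theorem fA_eq_fB (L2 : PySem.Dict String Int) (h1 : List String) :
    fA L2 h1 = fB L2 (lastD h1) h1 PySem.Dict.empty := by
  induction h1 using List.reverseRecOn with
  | nil => rfl
  | append_singleton t x ih =>
    have hlen : (((t ++ [x]).length : Int)) = (t.length : Int) + 1 := by simp
    have hxget : PySem.List.pyGetD (t ++ [x]) ((t.length : Int)) "" = x := by
      rw [PySem.List.pyGetD_eq_getElem (t ++ [x]) "" (Int.natCast_nonneg _) (by simp)]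
      simp
    have hA : fA L2 (t ++ [x]) =
        (match L2.get? x with
         | some j => (fA L2 t).insert x [(t.length : Int), j]
         | none => fA L2 t) := by
      unfold fA
      rw [hlen, PySem.List.pyRange_one_succ_right (Int.natCast_nonneg _), List.foldl_append]
      rw [PySem.List.foldl_congr_mem _ _
        (fun d i => match L2.get? (PySem.List.pyGetD t i "") with
          | some j => d.insert (PySem.List.pyGetD t i "") [i, j]
          | none => d) PySem.Dict.empty
        (by
          intro acc i hi
          rcases (PySem.List.mem_pyRange_one).1 hi with ⟨hi0, hi1⟩
          have e : PySem.List.pyGetD (t ++ [x]) i "" = PySem.List.pyGetD t i "" := by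
            rw [PySem.List.pyGetD_eq_getElem (t ++ [x]) "" hi0 (by simp; omega),
              PySem.List.pyGetD_eq_getElem t "" hi0 (by exact_mod_cast hi1)]
            exact List.getElem_append_left (by omega)
          simp only [e])]
      simp only [List.foldl_cons, List.foldl_nil, hxget]
    have hB : fB L2 (lastD (t ++ [x])) (t ++ [x]) PySem.Dict.empty =
        (match L2.get? x with
         | some j => (fB L2 ((lastD t).insert x (t.length : Int)) t PySem.Dict.empty).insert x
            [(t.length : Int), j]
         | none => fB L2 ((lastD t).insert x (t.length : Int)) t PySem.Dict.empty) := by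
      rw [lastD_append]
      unfold fB
      rw [List.foldl_append]
      simp only [List.foldl_cons, List.foldl_nil]
      cases h : L2.get? x
      · rfl
      · rw [PySem.Dict.getD_insert_self]
    rw [hA, hB]
    cases h : L2.get? x
    · rw [ih]
      exact fB_congr L2 (lastD t) ((lastD t).insert x (t.length : Int)) t _
        (fun s hs hsome => by
          have hsx : s ≠ x := by
            intro he
            rw [he, h] at hsome
            simp at hsome
          exact (PySem.Dict.getD_insert_of_ne (lastD t) (t.length : Int) 0 hsx).symm)
    · rw [ih]
      apply insert_congr_off
      · rw [keys_fB, keys_fB, map_fst_psOf, map_fst_psOf]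
      · exact nodup_keys_fB L2 (lastD t) t
      · intro k hkx
        rw [fB_eq_bfold, fB_eq_bfold, get?_bfold, get?_bfold, filter_psOf_insert L2 (lastD t) t x _ k hkx]

-- ===== VERDICT (by name: the statement is the Claim_ definition above) =====
theorem findCommonAttribute_py_spec : Claim_equal_findCommonAttribute_py := by
  intro h1 h2 _
  unfold Spec_findCommonAttribute_py findCommonAttribute_py findCommonAttribute_py_alt
  have hB2 : (PySem.List.enumerate h2 0).foldl (fun d p => d.insert p.2 p.1) PySem.Dict.empty = lastD h2 := rfl
  have hB1 : (PySem.List.enumerate h1 0).foldl (fun d p => d.insert p.2 p.1) PySem.Dict.empty = lastD h1 := rfl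
  simp only [hB1, hB2]
  rw [dictA_eq_fA, dictB_eq_fB, fA_eq_fB]
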